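-- pv_equiv track=rewrite | github.com/aktaylor08/advent-of-code | aoc/y2023/day14.py | tilt_up
-- ===== SOURCE A (Python) =====
-- def tilt_up(rocks: list[list[str]]) -> list[list[str]]:
--     for col in range(len(rocks[0])):
--         for row in range(len(rocks)):
--             if rocks[row][col] in ["O", "#"]:
--                 continue
--             for up in range(row + 1, len(rocks)):
--                 if rocks[up][col] == "#":
--                     break
--                 if rocks[up][col] == "O":
--                     rocks[row][col] = "O"
--                     rocks[up][col] = "."
--                     break
--     return rocks
-- ===== SOURCE B (Python) =====
-- # Segment-based rebuild: per column, split on '#' walls and pack each segment's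
-- # 'O's to the top in one pass, instead of A's quadratic nearest-rock scan per cell.
-- # Like A, mutates rocks in place and returns it.
--
-- def _pack(seg):
--     k = sum(1 for c in seg if c == "O")
--     return ["O"] * k + [("." if c == "O" else c) for c in seg[k:]]
--
--
-- def tilt_up(rocks: list[list[str]]) -> list[list[str]]:
--     for col in range(len(rocks[0])):
--         column = [row[col] for row in rocks]
--         out = []
--         seg = []
--         for cell in column:
--             if cell == "#":
--                 out.extend(_pack(seg))
--                 out.append("#")
--                 seg = []
--             else:
--                 seg.append(cell)
--         out.extend(_pack(seg))
--         for r, v in enumerate(out):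
--             rocks[r][col] = v
--     return rocks
-- ===== Notes on version B (the rewrite author's own statement) =====
-- stated objective: faster
-- what changed: A scans downward from every non-rock cell to find the nearest 'O' (quadratic per column); B rebuilds each column in one pass by splitting it at '#' walls and packing each segment's 'O' count to the top.
-- outside the precondition, e.g. on tilt_up([]): A raises IndexError, B raises IndexError; on tilt_up([['.', '.'], ['O']]): A raises IndexError, B raises IndexError
import Mathlib
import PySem

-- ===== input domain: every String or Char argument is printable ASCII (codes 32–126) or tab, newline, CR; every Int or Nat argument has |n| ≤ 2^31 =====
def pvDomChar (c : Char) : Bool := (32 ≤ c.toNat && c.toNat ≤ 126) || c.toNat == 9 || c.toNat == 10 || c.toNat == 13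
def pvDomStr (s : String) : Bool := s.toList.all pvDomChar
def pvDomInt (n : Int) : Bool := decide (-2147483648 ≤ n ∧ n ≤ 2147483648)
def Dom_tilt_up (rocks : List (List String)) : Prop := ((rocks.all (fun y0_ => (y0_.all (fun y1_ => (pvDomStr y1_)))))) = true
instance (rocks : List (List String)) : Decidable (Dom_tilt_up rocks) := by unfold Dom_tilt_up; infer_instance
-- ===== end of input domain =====

-- B replaces A's per-cell downward scan by a per-column segment rebuild (split at '#',
-- pack the 'O's of each segment to the top in one pass); objective: faster.
-- Both A and B mutate `rocks` in place in Python; the equivalence proved here is about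
-- the returned value (which is the mutated grid itself, identical for both).

-- ===== PORT A =====
-- rocks[r][c] read with Python's semantics on the admitted (in-bounds) inputs
def getC (g : List (List String)) (r c : Nat) : String := (g.getD r []).getD c ""

-- rocks[r][c] = v
def setC : List (List String) → Nat → Nat → String → List (List String)
  | [], _, _, _ => []
  | row :: rest, 0, c, v => row.set c v :: rest
  | row :: rest, r + 1, c, v => row :: setC rest r c v

-- the inner `for up in range(row+1, len(rocks))` loop with its two breaks
def pullA (g : List (List String)) (col row : Nat) : List Nat → List (List String)
  | [] => g
  | u :: us =>
    if getC g u col = "#" then g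
    else if getC g u col = "O" then setC (setC g row col "O") u col "."
    else pullA g col row us

-- body of `for row in range(len(rocks))`
def stepA (n col : Nat) (g : List (List String)) (row : Nat) : List (List String) :=
  if getC g row col = "O" ∨ getC g row col = "#" then g
  else pullA g col row (List.range' (row + 1) (n - (row + 1)))

def tilt_up (rocks : List (List String)) : List (List String) :=
  (List.range (rocks.headD []).length).foldl
    (fun g col => (List.range rocks.length).foldl (stepA rocks.length col) g) rocks

-- ===== PORT B =====
-- _pack: k 'O's on top, the rest with each 'O' replaced by '.'
def pack (seg : List String) : List String :=
  List.replicate (seg.countP (fun c => c == "O")) "O" ++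
    (seg.drop (seg.countP (fun c => c == "O"))).map (fun c => if c == "O" then "." else c)

-- the per-column loop of B: split at '#', pack each segment
def buildCol (column : List String) : List String :=
  let p := column.foldl
    (fun (p : List String × List String) cell =>
      if cell == "#" then (p.1 ++ pack p.2 ++ ["#"], ([] : List String))
      else (p.1, p.2 ++ [cell]))
    (([], []) : List String × List String)
  p.1 ++ pack p.2

-- column = [row[col] for row in rocks]
def colOf (g : List (List String)) (col : Nat) : List String :=
  g.map (fun row => row.getD col "")

-- for r, v in enumerate(out): rocks[r][col] = v
def writeCol (g : List (List String)) (col : Nat) (vals : List String) : List (List String) :=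
  vals.zipIdx.foldl (fun g p => setC g p.2 col p.1) g

def tilt_up_alt (rocks : List (List String)) : List (List String) :=
  (List.range (rocks.headD []).length).foldl
    (fun g col => writeCol g col (buildCol (colOf g col))) rocks

-- ===== PRECONDITION & SPEC =====
-- Pre_ excludes exactly the inputs on which Python A raises IndexError:
-- the empty grid (rocks[0]) and grids with a row shorter than the first row.
def Pre_tilt_up (rocks : List (List String)) : Prop :=
  rocks ≠ [] ∧ ∀ row ∈ rocks, (rocks.headD []).length ≤ row.length

instance (rocks : List (List String)) : Decidable (Pre_tilt_up rocks) := by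
  unfold Pre_tilt_up; infer_instance

def pvWitness_tilt_up : List (List String) := [[".", "."], ["O", "#"]]

def Spec_tilt_up (rocks : List (List String)) (out : List (List String)) : Prop :=
  out = tilt_up_alt rocks
instance (rocks : List (List String)) (out : List (List String)) : Decidable (Spec_tilt_up rocks out) := by
  unfold Spec_tilt_up; infer_instance

-- ===== CLAIM (what is proved, stated in full; the proofs are below) =====
def Claim_equal_tilt_up : Prop :=
  ∀ (rocks : List (List String)), Dom_tilt_up rocks → Pre_tilt_up rocks →
    Spec_tilt_up rocks (tilt_up rocks)

-- ===== LEMMAS AND PROOFS =====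

-- ---------- generic list lemmas ----------
theorem getD_app_left (l₁ l₂ : List String) (i : Nat) (h : i < l₁.length) (d : String) :
    (l₁ ++ l₂).getD i d = l₁.getD i d := by
  simp [List.getD_eq_getElem?_getD, List.getElem?_append_left h]

theorem getD_app_right (l₁ l₂ : List String) (i : Nat) (d : String) :
    (l₁ ++ l₂).getD (l₁.length + i) d = l₂.getD i d := by
  simp [List.getD_eq_getElem?_getD, List.getElem?_append_right (by omega : l₁.length ≤ l₁.length + i)]

theorem set_app_left {α : Type} (l₁ l₂ : List α) (i : Nat) (h : i < l₁.length) (v : α) :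
    (l₁ ++ l₂).set i v = l₁.set i v ++ l₂ := by
  induction l₁ generalizing i with
  | nil => simp at h
  | cons a t ih =>
    cases i with
    | zero => simp
    | succ j => simp only [List.cons_append, List.set_cons_succ]
                rw [ih j (by simpa using h)]

theorem set_app_right {α : Type} (l₁ l₂ : List α) (i : Nat) (v : α) :
    (l₁ ++ l₂).set (l₁.length + i) v = l₁ ++ l₂.set i v := by
  induction l₁ with
  | nil => simp
  | cons a t ih => simpa [Nat.succ_add] using ih

theorem range'_shift (q s m : Nat) :
    List.range' (q + s) m = (List.range' s m).map (fun x => q + x) := by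
  simp only [List.range'_eq_map_range, List.map_map]
  exact List.map_congr_left (fun x _ => by simp [Function.comp]; omega)

-- ---------- column-level model of A ----------
def cpull (cs : List String) (row : Nat) : List Nat → List String
  | [] => cs
  | u :: us =>
    if cs.getD u "" = "#" then cs
    else if cs.getD u "" = "O" then (cs.set row "O").set u "."
    else cpull cs row us

def cstep (n : Nat) (cs : List String) (row : Nat) : List String :=
  if cs.getD row "" = "O" ∨ cs.getD row "" = "#" then cs
  else cpull cs row (List.range' (row + 1) (n - (row + 1)))

def ctilt (cs : List String) : List String :=
  (List.range cs.length).foldl (cstep cs.length) cs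

theorem length_cpull (cs : List String) (row : Nat) (us : List Nat) :
    (cpull cs row us).length = cs.length := by
  induction us with
  | nil => rfl
  | cons u us ih => unfold cpull; split_ifs <;> simp [ih]

theorem length_cstep (n : Nat) (cs : List String) (row : Nat) :
    (cstep n cs row).length = cs.length := by
  unfold cstep; split_ifs <;> simp [length_cpull]

theorem length_fold_cstep (n : Nat) (l : List Nat) (cs : List String) :
    (l.foldl (cstep n) cs).length = cs.length := by
  induction l generalizing cs with
  | nil => rfl
  | cons r l ih => simp [List.foldl_cons, ih, length_cstep]

-- ---------- the 'blank' description of A's intermediate states ----------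
def cntO (l : List String) : Nat := l.countP (fun c => c == "O")

-- turn the first c 'O's into '.'
def blank : Nat → List String → List String
  | _, [] => []
  | 0, l => l
  | c + 1, x :: xs => if x = "O" then "." :: blank c xs else x :: blank (c + 1) xs

def mfun (c : String) : String := if c == "O" then "." else c

theorem blank_zero (l : List String) : blank 0 l = l := by cases l <;> rfl

theorem blank_cons_O (c : Nat) (xs : List String) :
    blank (c + 1) ("O" :: xs) = "." :: blank c xs := by simp [blank]

theorem blank_cons_ne {x : String} (h : x ≠ "O") (c : Nat) (xs : List String) :
    blank c (x :: xs) = x :: blank c xs := by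
  cases c with
  | zero => simp [blank_zero]
  | succ c => simp [blank, h]

theorem blank_all {t : List String} {c : Nat} (h : cntO t ≤ c) : blank c t = t.map mfun := by
  induction t generalizing c with
  | nil => simp [blank]
  | cons x xs ih =>
    by_cases hx : x = "O"
    · subst hx
      have h1 : cntO ("O" :: xs) = cntO xs + 1 := by simp [cntO, List.countP_cons]
      cases c with
      | zero => omega
      | succ c =>
        rw [blank_cons_O, ih (by omega)]
        simp [mfun]
    · rw [blank_cons_ne hx, ih (by simp [cntO, List.countP_cons, hx] at h ⊢; omega)]
      simp [mfun, hx]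

theorem mfun_ne_O (y : String) : mfun y ≠ "O" := by
  unfold mfun; split_ifs with h <;> simp_all

theorem mfun_ne_hash {y : String} (h : y ≠ "#") : mfun y ≠ "#" := by
  unfold mfun; split_ifs with h2 <;> simp_all

-- ---------- cpull lemmas ----------
theorem cpull_none {cs : List String} {row : Nat} {us : List Nat}
    (h : ∀ u ∈ us, cs.getD u "" ≠ "#" ∧ cs.getD u "" ≠ "O") :
    cpull cs row us = cs := by
  induction us with
  | nil => rfl
  | cons u us ih =>
    have := h u (by simp)
    unfold cpull
    rw [if_neg this.1, if_neg this.2]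
    exact ih (fun v hv => h v (by simp [hv]))

theorem getD_mid (P : List String) (x : String) (X : List String) :
    (P ++ x :: X).getD P.length "" = x := by
  simpa using getD_app_right P (x :: X) 0 ""

theorem set_mid (P : List String) (x v : String) (X : List String) :
    (P ++ x :: X).set P.length v = P ++ v :: X := by
  simpa using set_app_right P (x :: X) 0 v

theorem getD_repl_mid (r : Nat) (x : String) (X : List String) :
    (List.replicate r "O" ++ x :: X).getD r "" = x := by
  have := getD_mid (List.replicate r "O") x X
  simpa using this

theorem set_repl_mid (r : Nat) (x v : String) (X : List String) :
    (List.replicate r "O" ++ x :: X).set r v = List.replicate r "O" ++ v :: X := by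
  have := set_mid (List.replicate r "O") x v X
  simpa using this

theorem repl_succ_mid (r : Nat) (X : List String) :
    List.replicate r "O" ++ "O" :: X = List.replicate (r + 1) "O" ++ X := by
  rw [List.replicate_succ']
  simp

theorem cpull_blank (t : List String) (d : Nat) (P : List String) (row : Nat)
    (hw : "#" ∉ t) (hc : d + 1 ≤ cntO t) (hr : row < P.length) :
    cpull (P ++ blank d t) row (List.range' P.length t.length) =
      (P ++ blank (d + 1) t).set row "O" := by
  induction t generalizing d P with
  | nil => simp [cntO] at hc
  | cons x t' ih =>
    have hx_ne_hash : x ≠ "#" := fun h => hw (by simp [h])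
    have hw' : "#" ∉ t' := fun h => hw (by simp [h])
    rw [List.length_cons, List.range'_succ]
    by_cases hx : x = "O"
    · subst hx
      have hcnt : cntO ("O" :: t') = cntO t' + 1 := by
        unfold cntO; rw [List.countP_cons]; simp
      cases d with
      | zero =>
        rw [blank_zero]
        unfold cpull
        rw [getD_mid]
        rw [if_neg (by decide : ("O" : String) ≠ "#"), if_pos rfl]
        rw [blank_cons_O, blank_zero]
        rw [List.set_comm _ _ (by omega)]
        rw [set_mid]
      | succ e =>
        rw [blank_cons_O]
        unfold cpull
        rw [getD_mid]
        rw [if_neg (by decide : ("." : String) ≠ "#"), if_neg (by decide : ("." : String) ≠ "O")]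
        have hc' : e + 1 ≤ cntO t' := by omega
        have hrec := ih e (P ++ ["."]) hw' hc' (by simp; omega)
        rw [show P ++ "." :: blank e t' = (P ++ ["."]) ++ blank e t' by simp,
            show P.length + 1 = (P ++ ["."] : List String).length by simp]
        rw [hrec, blank_cons_O]
        simp
    · rw [blank_cons_ne hx]
      unfold cpull
      rw [getD_mid]
      rw [if_neg hx_ne_hash, if_neg hx]
      have hc' : d + 1 ≤ cntO t' := by
        have : cntO (x :: t') = cntO t' := by
          unfold cntO; rw [List.countP_cons]; simp [hx]
        omega
      have hrec := ih d (P ++ [x]) hw' hc' (by simp; omega)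
      rw [show P ++ x :: blank d t' = (P ++ [x]) ++ blank d t' by simp,
          show P.length + 1 = (P ++ [x] : List String).length by simp]
      rw [hrec, blank_cons_ne hx]
      simp

-- ---------- pack lemmas ----------
theorem pack_eq (seg : List String) :
    pack seg = List.replicate (cntO seg) "O" ++ (seg.drop (cntO seg)).map mfun := by
  rfl

theorem cntO_le_length (l : List String) : cntO l ≤ l.length := List.countP_le_length

theorem pack_getD_ge {cs : List String} {i : Nat} (h1 : cntO cs ≤ i) (h2 : i < cs.length) :
    (pack cs).getD i "" = mfun (cs.getD i "") := by
  rw [pack_eq]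
  have h3 : i = cntO cs + (i - cntO cs) := by omega
  have key : (List.replicate (cntO cs) "O" ++ (cs.drop (cntO cs)).map mfun).getD
      (cntO cs + (i - cntO cs)) "" = ((cs.drop (cntO cs)).map mfun).getD (i - cntO cs) "" := by
    have := getD_app_right (List.replicate (cntO cs) "O") ((cs.drop (cntO cs)).map mfun)
      (i - cntO cs) ""
    simpa using this
  rw [h3, key]
  rw [List.getD_eq_getElem?_getD, List.getElem?_map, List.getElem?_drop,
      List.getD_eq_getElem?_getD, List.getElem?_eq_getElem (by omega : cntO cs + (i - cntO cs) < cs.length)]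
  rfl

-- ---------- the wall-free core: A's fold state after r rows ----------
def stA (cs : List String) (r : Nat) : List String :=
  if r ≤ cntO cs then
    List.replicate r "O" ++ blank (r - cntO (cs.take r)) (cs.drop r)
  else pack cs

theorem cntO_take_le (cs : List String) (r : Nat) :
    cntO (cs.take r) ≤ r := by
  have := cntO_le_length (cs.take r)
  have := List.length_take_le r cs
  omega

theorem cntO_split (cs : List String) (r : Nat) :
    cntO cs = cntO (cs.take r) + cntO (cs.drop r) := by
  unfold cntO
  rw [← List.countP_append, List.take_append_drop]

theorem cntO_take_succ {cs : List String} {r : Nat} (h : r < cs.length) :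
    cntO (cs.take (r + 1)) = cntO (cs.take r) + (if cs[r] = "O" then 1 else 0) := by
  unfold cntO
  rw [List.take_add_one, List.getElem?_eq_getElem h, List.countP_append]
  by_cases hx : cs[r] = "O" <;> simp [hx, List.countP_cons]

theorem cntO_drop_succ {cs : List String} {r : Nat} (h : r < cs.length) :
    cntO (cs.drop r) = cntO (cs.drop (r + 1)) + (if cs[r] = "O" then 1 else 0) := by
  have h1 := cntO_split cs r
  have h2 := cntO_split cs (r + 1)
  have h3 := cntO_take_succ h
  omega

theorem pack_fix {cs : List String} (hw : "#" ∉ cs) {n r : Nat}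
    (hn : n = cs.length) (hk : cntO cs ≤ r) (hr : r < n) :
    cstep n (pack cs) r = pack cs := by
  have hcell : ∀ u, cntO cs ≤ u → u < n →
      (pack cs).getD u "" ≠ "#" ∧ (pack cs).getD u "" ≠ "O" := by
    intro u h1 h2
    rw [pack_getD_ge h1 (hn ▸ h2)]
    refine ⟨?_, mfun_ne_O _⟩
    apply mfun_ne_hash
    intro hmem
    apply hw
    have hu : u < cs.length := hn ▸ h2
    have : cs.getD u "" ∈ cs := by
      rw [List.getD_eq_getElem?_getD, List.getElem?_eq_getElem hu]
      exact List.getElem_mem hu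
    rwa [hmem] at this
  unfold cstep
  rw [if_neg (by have := hcell r hk hr; tauto)]
  apply cpull_none
  intro u hu
  have := List.mem_range'_1.mp hu
  exact hcell u (by omega) (by omega)

theorem core_step {cs : List String} (hw : "#" ∉ cs) {r : Nat} (hr : r < cs.length) :
    cstep cs.length (stA cs r) r = stA cs (r + 1) := by
  by_cases hrk : r < cntO cs
  · have htake := cntO_take_le cs r
    have hsplit := cntO_split cs r
    have hdrop : cs.drop r = cs[r] :: cs.drop (r + 1) := List.drop_eq_getElem_cons hr
    have hstA : stA cs r =
        List.replicate r "O" ++ blank (r - cntO (cs.take r)) (cs.drop r) := by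
      unfold stA; rw [if_pos (by omega)]
    have hmemr : cs[r] ∈ cs := List.getElem_mem hr
    have hhash : cs[r] ≠ "#" := fun h => hw (h ▸ hmemr)
    set c := r - cntO (cs.take r) with hc
    have hcnt_drop1 : c + 1 ≤ cntO (cs.drop r) := by omega
    have hdropsucc := cntO_drop_succ hr
    have hw2 : "#" ∉ cs.drop (r + 1) := fun h => hw (List.mem_of_mem_drop h)
    by_cases hO : cs[r] = "O"
    · have hsucc : cntO (cs.take (r + 1)) = cntO (cs.take r) + 1 := by
        rw [cntO_take_succ hr]; simp [hO]
      cases hcz : c with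
      | zero =>
        have hcell : (stA cs r).getD r "" = "O" := by
          rw [hstA, hdrop, hcz, blank_zero, hO, getD_repl_mid]
        unfold cstep
        rw [if_pos (Or.inl hcell)]
        rw [hstA, hdrop, hcz, blank_zero]
        unfold stA
        rw [if_pos (by omega)]
        rw [show r + 1 - cntO (cs.take (r + 1)) = 0 by omega, blank_zero, hO, repl_succ_mid]
      | succ e =>
        have hblank : blank c (cs.drop r) = "." :: blank e (cs.drop (r + 1)) := by
          rw [hdrop, hO, hcz, blank_cons_O]
        have hcell : (stA cs r).getD r "" = "." := by
          rw [hstA, hblank, getD_repl_mid]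
        unfold cstep
        rw [if_neg (by rw [hcell]; rintro (h | h) <;> simp at h)]
        have hcnt' : e + 1 ≤ cntO (cs.drop (r + 1)) := by
          rw [hO] at hdropsucc; simp at hdropsucc; omega
        have hrange : List.range' (r + 1) (cs.length - (r + 1)) =
            List.range' (List.replicate r "O" ++ ["."] : List String).length
              (cs.drop (r + 1)).length := by
          simp
        rw [hstA, hblank,
            show (List.replicate r "O" : List String) ++ "." :: blank e (cs.drop (r + 1)) =
              (List.replicate r "O" ++ ["."]) ++ blank e (cs.drop (r + 1)) by simp,
            hrange]
        rw [cpull_blank _ e _ r hw2 hcnt' (by simp)]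
        rw [show (List.replicate r "O" ++ ["."] : List String) ++ blank (e + 1) (cs.drop (r + 1))
              = List.replicate r "O" ++ "." :: blank (e + 1) (cs.drop (r + 1)) by simp]
        rw [set_repl_mid, repl_succ_mid]
        unfold stA
        rw [if_pos (by omega)]
        rw [show r + 1 - cntO (cs.take (r + 1)) = e + 1 by omega]
    · have hsucc : cntO (cs.take (r + 1)) = cntO (cs.take r) := by
        rw [cntO_take_succ hr]; simp [hO]
      have hblank : blank c (cs.drop r) = cs[r] :: blank c (cs.drop (r + 1)) := by
        rw [hdrop, blank_cons_ne hO]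
      have hcell : (stA cs r).getD r "" = cs[r] := by
        rw [hstA, hblank, getD_repl_mid]
      unfold cstep
      rw [if_neg (by rw [hcell]; rintro (h | h) <;> [exact hO h; exact hhash h])]
      have hcnt' : c + 1 ≤ cntO (cs.drop (r + 1)) := by
        rw [if_neg hO] at hdropsucc; omega
      have hrange : List.range' (r + 1) (cs.length - (r + 1)) =
          List.range' (List.replicate r "O" ++ [cs[r]] : List String).length
            (cs.drop (r + 1)).length := by
        simp
      rw [hstA, hblank,
          show (List.replicate r "O" : List String) ++ cs[r] :: blank c (cs.drop (r + 1)) =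
            (List.replicate r "O" ++ [cs[r]]) ++ blank c (cs.drop (r + 1)) by simp,
          hrange]
      rw [cpull_blank _ c _ r hw2 hcnt' (by simp)]
      rw [show (List.replicate r "O" ++ [cs[r]] : List String) ++ blank (c + 1) (cs.drop (r + 1))
            = List.replicate r "O" ++ cs[r] :: blank (c + 1) (cs.drop (r + 1)) by simp]
      rw [set_repl_mid, repl_succ_mid]
      unfold stA
      rw [if_pos (by omega)]
      rw [show r + 1 - cntO (cs.take (r + 1)) = c + 1 by omega]
  · have hstA : stA cs r = pack cs := by
      unfold stA
      by_cases hreq : r ≤ cntO cs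
      · rw [if_pos hreq]
        have h1 := cntO_split cs r
        rw [show r - cntO (cs.take r) = cntO (cs.drop r) by omega,
            blank_all (le_refl _), pack_eq,
            show r = cntO cs by omega]
      · rw [if_neg hreq]
    have hstA' : stA cs (r + 1) = pack cs := by
      unfold stA; rw [if_neg (by omega)]
    rw [hstA, hstA']
    exact pack_fix hw rfl (by omega) hr

theorem core_fold {cs : List String} (hw : "#" ∉ cs) :
    ∀ r, r ≤ cs.length → (List.range r).foldl (cstep cs.length) cs = stA cs r := by
  intro r
  induction r with
  | zero =>
    intro _
    unfold stA
    simp [blank_zero, cntO]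
  | succ r ih =>
    intro h
    rw [List.range_succ, List.foldl_append, List.foldl_cons, List.foldl_nil,
        ih (by omega), core_step hw (by omega)]

theorem core {cs : List String} (hw : "#" ∉ cs) : ctilt cs = pack cs := by
  unfold ctilt
  rw [core_fold hw cs.length (le_refl _)]
  unfold stA
  split_ifs with h
  · have hk : cntO cs = cs.length := le_antisymm (cntO_le_length cs) h
    rw [pack_eq, hk]
    simp [blank]
  · rfl
-- ---------- splitting A's fold at a wall ----------
theorem cpull_app_wall {cs : List String} {row w : Nat} {us vs : List Nat}
    (h : cs.getD w "" = "#") :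
    cpull cs row (us ++ w :: vs) = cpull cs row us := by
  induction us with
  | nil =>
    show cpull cs row (w :: vs) = cs
    unfold cpull
    rw [if_pos h]
  | cons u us ih =>
    simp only [List.cons_append]
    unfold cpull
    split_ifs <;> simp [ih]

theorem cpull_app_left {s X : List String} {row : Nat} {us : List Nat}
    (hrow : row < s.length) (h : ∀ u ∈ us, u < s.length) :
    cpull (s ++ X) row us = cpull s row us ++ X := by
  induction us with
  | nil => rfl
  | cons u us ih =>
    have hu : u < s.length := h u (by simp)
    unfold cpull
    rw [getD_app_left _ _ _ hu]
    split_ifs with h1 h2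
    · rfl
    · rw [set_app_left _ _ _ hrow, set_app_left _ _ _ (by simpa using hu)]
    · exact ih (fun v hv => h v (by simp [hv]))

theorem stepI (s' t : List String) (r : Nat) (hr : r < s'.length) :
    cstep (s'.length + 1 + t.length) (s' ++ "#" :: t) r = cstep s'.length s' r ++ "#" :: t := by
  unfold cstep
  rw [getD_app_left _ _ _ hr]
  split_ifs with h
  · rfl
  · have hsplit : List.range' (r + 1) (s'.length + 1 + t.length - (r + 1)) =
        List.range' (r + 1) (s'.length - (r + 1)) ++
          s'.length :: List.range' (s'.length + 1) t.length := by
      rw [show s'.length + 1 + t.length - (r + 1) = (s'.length - (r + 1)) + (1 + t.length) from by omega]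
      rw [← List.range'_append (step := 1)]
      congr 1
      · rw [show r + 1 + 1 * (s'.length - (r + 1)) = s'.length from by omega]
        rw [Nat.add_comm 1 t.length, List.range'_succ]
    rw [hsplit, cpull_app_wall (getD_mid s' "#" t)]
    exact cpull_app_left hr (fun u hu => by
      have := List.mem_range'_1.mp hu; omega)

theorem foldI (t : List String) :
    ∀ (l : List Nat) (s s' : List String), s'.length = s.length → (∀ u ∈ l, u < s.length) →
    l.foldl (cstep (s.length + 1 + t.length)) (s' ++ "#" :: t) =
      l.foldl (cstep s.length) s' ++ "#" :: t := by
  intro l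
  induction l with
  | nil => intro s s' _ _; rfl
  | cons r l ih =>
    intro s s' hlen hmem
    simp only [List.foldl_cons]
    have hr : r < s'.length := hlen ▸ hmem r (by simp)
    rw [show s.length = s'.length from hlen.symm] at *
    rw [stepI s' t r hr]
    exact ih s' (cstep s'.length s' r) (length_cstep _ _ _) (fun u hu => hmem u (by simp [hu]))

theorem cpull_shift (Q t' : List String) (row : Nat) (us : List Nat) :
    cpull (Q ++ t') (Q.length + row) (us.map (fun u => Q.length + u)) =
      Q ++ cpull t' row us := by
  induction us with
  | nil => rfl
  | cons u us ih =>
    simp only [List.map_cons]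
    unfold cpull
    rw [getD_app_right]
    split_ifs with h1 h2
    · rfl
    · rw [set_app_right, set_app_right]
    · exact ih

theorem stepIII (Q t' : List String) (m r : Nat) :
    cstep (Q.length + m) (Q ++ t') (Q.length + r) = Q ++ cstep m t' r := by
  unfold cstep
  rw [getD_app_right]
  split_ifs with h
  · rfl
  · rw [show Q.length + r + 1 = Q.length + (r + 1) from by omega,
        show Q.length + m - (Q.length + (r + 1)) = m - (r + 1) from by omega,
        range'_shift Q.length (r + 1) (m - (r + 1)), cpull_shift]

theorem foldIII (l : List Nat) (Q t' : List String) (m : Nat) :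
    (l.map (fun u => Q.length + u)).foldl (cstep (Q.length + m)) (Q ++ t') =
      Q ++ l.foldl (cstep m) t' := by
  induction l generalizing t' with
  | nil => rfl
  | cons r l ih =>
    simp only [List.map_cons, List.foldl_cons]
    rw [stepIII, ih]

theorem A_split (s t : List String) :
    ctilt (s ++ "#" :: t) = ctilt s ++ "#" :: ctilt t := by
  unfold ctilt
  have hlen : (s ++ "#" :: t).length = s.length + (1 + t.length) := by simp; omega
  rw [hlen]
  rw [List.range_eq_range', ← List.range'_append (step := 1) (s := 0)]
  simp only [Nat.zero_add, Nat.one_mul]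
  rw [List.foldl_append]
  have h1 : (List.range' 0 s.length).foldl
      (cstep (s.length + (1 + t.length))) (s ++ "#" :: t) =
      (List.range s.length).foldl (cstep s.length) s ++ "#" :: t := by
    rw [← List.range_eq_range']
    rw [show s.length + (1 + t.length) = s.length + 1 + t.length from by omega]
    exact foldI t (List.range s.length) s s rfl (fun u hu => List.mem_range.mp hu)
  rw [h1]
  set S := (List.range s.length).foldl (cstep s.length) s with hS
  have hSlen : S.length = s.length := length_fold_cstep _ _ _
  rw [Nat.add_comm 1 t.length, List.range'_succ]
  simp only [List.foldl_cons]
  have h2 : cstep (s.length + (t.length + 1)) (S ++ "#" :: t) s.length = S ++ "#" :: t := by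
    unfold cstep
    rw [if_pos (Or.inr (by rw [← hSlen]; exact getD_mid S "#" t))]
  rw [h2]
  have hQ : (S ++ ["#"] : List String).length = s.length + 1 := by simp [hSlen]
  have h3 : S ++ "#" :: t = (S ++ ["#"]) ++ t := by simp
  have h4 : List.range' (s.length + 1) t.length =
      (List.range t.length).map (fun u => (S ++ ["#"] : List String).length + u) := by
    have := range'_shift (s.length + 1) 0 t.length
    rw [Nat.add_zero] at this
    rw [this, ← List.range_eq_range', hQ]
  rw [h3, h4]
  rw [show s.length + (t.length + 1) = (S ++ ["#"] : List String).length + t.length from by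
        rw [hQ]; omega]
  rw [foldIII (List.range t.length) (S ++ ["#"]) t t.length]
  simp

-- ---------- B side: buildCol in terms of segments ----------
def bstep (p : List String × List String) (cell : String) : List String × List String :=
  if cell == "#" then (p.1 ++ pack p.2 ++ ["#"], ([] : List String)) else (p.1, p.2 ++ [cell])

theorem buildCol_eq (column : List String) :
    buildCol column = (column.foldl bstep ([], [])).1 ++ pack (column.foldl bstep ([], [])).2 := rfl

theorem bstep_wall (p : List String × List String) :
    bstep p "#" = (p.1 ++ pack p.2 ++ ["#"], ([] : List String)) := by
  simp [bstep]

theorem bstep_nowall (p : List String × List String) {x : String} (hx : x ≠ "#") :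
    bstep p x = (p.1, p.2 ++ [x]) := by
  simp [bstep, hx]

theorem bfold_nowall (l : List String) (hw : "#" ∉ l) :
    ∀ (out seg : List String), l.foldl bstep (out, seg) = (out, seg ++ l) := by
  induction l with
  | nil => intro out seg; simp
  | cons x l ih =>
    intro out seg
    have hx : x ≠ "#" := fun h => hw (by simp [h])
    rw [List.foldl_cons, bstep_nowall _ hx, ih (fun h => hw (by simp [h]))]
    simp

theorem bfold_acc (t : List String) :
    ∀ (out seg : List String),
      t.foldl bstep (out, seg) =
        (out ++ (t.foldl bstep ([], seg)).1, (t.foldl bstep ([], seg)).2) := by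
  induction t with
  | nil => intro out seg; simp
  | cons x t ih =>
    intro out seg
    by_cases hx : x = "#"
    · subst hx
      rw [List.foldl_cons, List.foldl_cons, bstep_wall, bstep_wall]
      rw [ih (out ++ pack seg ++ ["#"]) [], ih (([] : List String) ++ pack seg ++ ["#"]) []]
      simp
    · rw [List.foldl_cons, List.foldl_cons, bstep_nowall _ hx, bstep_nowall _ hx]
      exact ih out (seg ++ [x])

theorem buildCol_nowall (s : List String) (hw : "#" ∉ s) : buildCol s = pack s := by
  rw [buildCol_eq, bfold_nowall s hw [] []]
  simp

theorem buildCol_split (s t : List String) (hw : "#" ∉ s) :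
    buildCol (s ++ "#" :: t) = pack s ++ "#" :: buildCol t := by
  rw [buildCol_eq, List.foldl_append, bfold_nowall s hw [] [], List.foldl_cons, bstep_wall]
  simp only [List.nil_append]
  rw [bfold_acc t (pack s ++ ["#"]) []]
  rw [buildCol_eq]
  simp

-- ---------- column theorem: ctilt = buildCol ----------
theorem dropWhile_head_false {α : Type} (p : α → Bool) (l : List α) (x : α) (tl : List α)
    (h : l.dropWhile p = x :: tl) : p x = false := by
  induction l with
  | nil => simp [List.dropWhile] at h
  | cons a l ih =>
    by_cases hp : p a
    · rw [List.dropWhile_cons_of_pos hp] at h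
      exact ih h
    · rw [List.dropWhile_cons_of_neg hp] at h
      cases h
      simpa using hp

theorem thmCol_aux : ∀ (n : Nat) (cs : List String), cs.length ≤ n → ctilt cs = buildCol cs := by
  intro n
  induction n with
  | zero =>
    intro cs h
    have : cs = [] := List.eq_nil_of_length_eq_zero (by omega)
    subst this
    rfl
  | succ n ih =>
    intro cs h
    have hsplit := List.takeWhile_append_dropWhile (p := fun c => c != "#") (l := cs)
    have hwall : "#" ∉ cs.takeWhile (fun c => c != "#") := by
      intro hmem
      have := List.mem_takeWhile_imp hmem
      simp at this
    cases hd : cs.dropWhile (fun c => c != "#") with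
    | nil =>
      have hcs : cs = cs.takeWhile (fun c => c != "#") := by
        conv_lhs => rw [← hsplit, hd]
        simp
      rw [hcs, core hwall, buildCol_nowall _ hwall]
    | cons x tl =>
      have hx : x = "#" := by
        have := dropWhile_head_false (fun c => c != "#") cs x tl hd
        simpa using this
      subst hx
      have hcs : cs = cs.takeWhile (fun c => c != "#") ++ "#" :: tl := by
        conv_lhs => rw [← hsplit, hd]
      have hlen : tl.length ≤ n := by
        have h1 : cs.length = (cs.takeWhile (fun c => c != "#")).length + 1 + tl.length := by
          conv_lhs => rw [hcs]
          simp
          omega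
        omega
      rw [hcs, A_split, buildCol_split _ _ hwall, core hwall, ih tl hlen]

theorem thmCol (cs : List String) : ctilt cs = buildCol cs :=
  thmCol_aux cs.length cs (le_refl _)

-- ---------- grid-level lemmas ----------
theorem length_setC : ∀ (g : List (List String)) (r c : Nat) (v : String),
    (setC g r c v).length = g.length
  | [], _, _, _ => rfl
  | _ :: _, 0, _, _ => rfl
  | _ :: rest, r + 1, c, v => by simp [setC, length_setC rest r c v]

theorem setC_getElem?_ne : ∀ {g : List (List String)} {r i : Nat} (c : Nat) (v : String),
    i ≠ r → (setC g r c v)[i]? = g[i]? := by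
  intro g
  induction g with
  | nil => intro r i c v _; rfl
  | cons row rest ih =>
    intro r i c v h
    cases r with
    | zero =>
      cases i with
      | zero => omega
      | succ j => simp [setC]
    | succ r' =>
      cases i with
      | zero => simp [setC]
      | succ j => simpa [setC] using ih c v (by omega)

theorem setC_getElem?_self : ∀ (g : List (List String)) (r c : Nat) (v : String),
    (setC g r c v)[r]? = (g[r]?).map (fun row => row.set c v) := by
  intro g
  induction g with
  | nil => intro r c v; rfl
  | cons row rest ih =>
    intro r c v
    cases r with
    | zero => simp [setC]
    | succ r' => simpa [setC] using ih r' c v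

def GoodCol (g : List (List String)) (col : Nat) : Prop := ∀ row ∈ g, col < row.length

theorem GoodCol_setC {g : List (List String)} {c2 : Nat} (h : GoodCol g c2)
    (r c : Nat) (v : String) : GoodCol (setC g r c v) c2 := by
  induction g generalizing r with
  | nil => intro row hrow; simp [setC] at hrow
  | cons row rest ih =>
    cases r with
    | zero =>
      intro row' hrow'
      simp [setC] at hrow'
      rcases hrow' with h' | h'
      · subst h'; simpa using h row (by simp)
      · exact h row' (by simp [h'])
    | succ r' =>
      intro row' hrow'
      simp [setC] at hrow'
      rcases hrow' with h' | h'
      · subst h'; exact h row' (by simp)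
      · exact ih (fun q hq => h q (by simp [hq])) r' row' h'

theorem colOf_length (g : List (List String)) (col : Nat) : (colOf g col).length = g.length := by
  simp [colOf]

theorem getC_eq (g : List (List String)) (r col : Nat) :
    getC g r col = (colOf g col).getD r "" := by
  unfold getC colOf
  rcases h : g[r]? with _ | row <;>
    simp [List.getD_eq_getElem?_getD, List.getElem?_map, h]

theorem colOf_setC {g : List (List String)} {col : Nat} (hg : GoodCol g col)
    {r : Nat} {v : String} : colOf (setC g r col v) col = (colOf g col).set r v := by
  induction g generalizing r with
  | nil => simp [setC, colOf]
  | cons row rest ih =>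
    cases r with
    | zero =>
      simp only [setC, colOf, List.map_cons, List.set_cons_zero]
      congr 1
      have hc : col < row.length := hg row (by simp)
      rw [List.getD_eq_getElem?_getD, List.getElem?_set_self (by simpa using hc)]
      rfl
    | succ r' =>
      simp only [setC, colOf, List.map_cons, List.set_cons_succ]
      congr 1
      exact ih (fun q hq => hg q (by simp [hq]))

def EqOff (g g' : List (List String)) (col : Nat) : Prop :=
  g'.length = g.length ∧
  (∀ i : Nat, (g'[i]?.getD []).length = (g[i]?.getD []).length) ∧
  (∀ i c : Nat, c ≠ col → (g'[i]?.getD [])[c]? = (g[i]?.getD [])[c]?)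

theorem EqOff_refl (g : List (List String)) (col : Nat) : EqOff g g col :=
  ⟨rfl, fun _ => rfl, fun _ _ _ => rfl⟩

theorem EqOff_setC {g g' : List (List String)} {col : Nat} (h : EqOff g g' col)
    (r : Nat) (v : String) : EqOff g (setC g' r col v) col := by
  obtain ⟨h1, h2, h3⟩ := h
  refine ⟨by rw [length_setC]; exact h1, ?_, ?_⟩
  · intro i
    by_cases hir : i = r
    · subst hir
      rw [setC_getElem?_self]
      cases hgi : g'[i]? with
      | none => have := h2 i; rw [hgi] at this; simpa using this
      | some row => have := h2 i; rw [hgi] at this; simpa using this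
    · rw [setC_getElem?_ne _ _ hir]; exact h2 i
  · intro i c hc
    by_cases hir : i = r
    · subst hir
      rw [setC_getElem?_self]
      cases hgi : g'[i]? with
      | none => have := h3 i c hc; rw [hgi] at this; simpa using this
      | some row =>
        have := h3 i c hc; rw [hgi] at this
        simp only [Option.map_some, Option.getD_some] at this ⊢
        rw [List.getElem?_set_ne (fun hh => hc hh.symm)]
        exact this
    · rw [setC_getElem?_ne _ _ hir]; exact h3 i c hc

theorem GoodCol_of_EqOff {g g' : List (List String)} {col c2 : Nat}
    (h : EqOff g g' col) (hg : GoodCol g c2) : GoodCol g' c2 := by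
  intro row hrow
  obtain ⟨i, hi, rfl⟩ := List.getElem_of_mem hrow
  have hlen := h.2.1 i
  have h1 := h.1
  have hgi : i < g.length := by omega
  rw [List.getElem?_eq_getElem hi, List.getElem?_eq_getElem hgi] at hlen
  simp only [Option.getD_some] at hlen
  rw [hlen]
  exact hg g[i] (List.getElem_mem hgi)

theorem pullA_props {g0 g : List (List String)} {col : Nat} (hgood : GoodCol g col)
    (heq : EqOff g0 g col) (row : Nat) :
    ∀ us : List Nat, colOf (pullA g col row us) col = cpull (colOf g col) row us ∧
      EqOff g0 (pullA g col row us) col := by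
  intro us
  induction us with
  | nil => exact ⟨rfl, heq⟩
  | cons u us ih =>
    unfold pullA cpull
    rw [getC_eq]
    split_ifs with h1 h2
    · exact ⟨rfl, heq⟩
    · refine ⟨?_, EqOff_setC (EqOff_setC heq row "O") u "."⟩
      rw [colOf_setC (GoodCol_setC hgood row col "O"), colOf_setC hgood]
    · exact ih

theorem stepA_props {g0 g : List (List String)} {col : Nat} (hgood : GoodCol g col)
    (heq : EqOff g0 g col) (n row : Nat) :
    colOf (stepA n col g row) col = cstep n (colOf g col) row ∧
      EqOff g0 (stepA n col g row) col := by
  unfold stepA cstep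
  rw [getC_eq]
  split_ifs with h
  · exact ⟨rfl, heq⟩
  · exact pullA_props hgood heq row _

theorem foldA_props {col n : Nat} {g0 : List (List String)} (hg0 : GoodCol g0 col) :
    ∀ (l : List Nat) (g : List (List String)), GoodCol g col → EqOff g0 g col →
    colOf (l.foldl (stepA n col) g) col = l.foldl (cstep n) (colOf g col) ∧
      EqOff g0 (l.foldl (stepA n col) g) col := by
  intro l
  induction l with
  | nil => intro g _ heq; exact ⟨rfl, heq⟩
  | cons r l ih =>
    intro g hgood heq
    simp only [List.foldl_cons]
    obtain ⟨hcol, heq'⟩ := stepA_props hgood heq n r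
    obtain ⟨ih1, ih2⟩ := ih (stepA n col g r) (GoodCol_of_EqOff heq' hg0) heq'
    exact ⟨by rw [ih1, hcol], ih2⟩

-- ---------- writeCol semantics ----------
def spliceCol (col : Nat) : List (List String) → Nat → List String → List (List String)
  | g, _, [] => g
  | g, k, v :: vs => spliceCol col (setC g k col v) (k + 1) vs

theorem writeCol_eq_splice (g : List (List String)) (col : Nat) (vals : List String) :
    writeCol g col vals = spliceCol col g 0 vals := by
  unfold writeCol
  have h : ∀ (vals : List String) (g : List (List String)) (k : Nat),
      (vals.zipIdx k).foldl (fun g p => setC g p.2 col p.1) g = spliceCol col g k vals := by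
    intro vals
    induction vals with
    | nil => intro g k; rfl
    | cons v vs ih => intro g k; rw [List.zipIdx_cons, List.foldl_cons]; exact ih _ _
  exact h vals g 0

theorem splice_getElem? (col : Nat) : ∀ (vals : List String) (g : List (List String)) (k i : Nat),
    (spliceCol col g k vals)[i]? =
      if k ≤ i ∧ i < k + vals.length then
        (g[i]?).map (fun row => row.set col (vals.getD (i - k) ""))
      else g[i]? := by
  intro vals
  induction vals with
  | nil =>
    intro g k i
    rw [if_neg (by simp)]
    rfl
  | cons v vs ih =>
    intro g k i
    rw [show spliceCol col g k (v :: vs) = spliceCol col (setC g k col v) (k + 1) vs from rfl, ih]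
    by_cases hik : i = k
    · subst hik
      rw [if_neg (by omega), if_pos (by simp only [List.length_cons]; omega)]
      rw [setC_getElem?_self]
      simp
    · by_cases hrange : k + 1 ≤ i ∧ i < k + 1 + vs.length
      · rw [if_pos hrange, if_pos (by simp only [List.length_cons]; omega)]
        rw [setC_getElem?_ne _ _ hik]
        have h2 : i - k = (i - (k + 1)) + 1 := by omega
        rw [h2, List.getD_cons_succ]
      · rw [if_neg hrange, if_neg (by simp only [List.length_cons]; omega), setC_getElem?_ne _ _ hik]

theorem length_splice (col : Nat) : ∀ (vals : List String) (g : List (List String)) (k : Nat),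
    (spliceCol col g k vals).length = g.length := by
  intro vals
  induction vals with
  | nil => intro g k; rfl
  | cons v vs ih =>
    intro g k
    rw [show spliceCol col g k (v :: vs) = spliceCol col (setC g k col v) (k + 1) vs from rfl,
        ih, length_setC]

theorem length_writeCol (g : List (List String)) (col : Nat) (vals : List String) :
    (writeCol g col vals).length = g.length := by
  rw [writeCol_eq_splice, length_splice]

theorem reconstruct {g g' : List (List String)} {col : Nat}
    (hgood : GoodCol g col) (heq : EqOff g g' col) :
    writeCol g col (colOf g' col) = g' := by
  obtain ⟨h1, h2, h3⟩ := heq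
  rw [writeCol_eq_splice]
  apply List.ext_getElem?
  intro i
  rw [splice_getElem? col (colOf g' col) g 0 i]
  have hlen : (colOf g' col).length = g'.length := colOf_length g' col
  by_cases hi : i < g.length
  · rw [if_pos (by omega)]
    have hi' : i < g'.length := by omega
    have hgi : g[i]? = some g[i] := List.getElem?_eq_getElem hi
    have hgi' : g'[i]? = some g'[i] := List.getElem?_eq_getElem hi'
    rw [hgi, hgi']
    simp only [Option.map_some]
    congr 1
    have hrowlen : g'[i].length = g[i].length := by
      have := h2 i; rw [hgi, hgi'] at this; simpa using this
    have hcol : col < g[i].length := hgood _ (List.getElem_mem hi)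
    have hvals : (colOf g' col).getD (i - 0) "" = g'[i].getD col "" := by
      simp only [Nat.sub_zero, colOf, List.getD_eq_getElem?_getD, List.getElem?_map, hgi']
      rfl
    rw [hvals]
    apply List.ext_getElem?
    intro cc
    by_cases hcc : cc = col
    · subst hcc
      rw [List.getElem?_set_self (by omega)]
      rw [List.getD_eq_getElem?_getD, List.getElem?_eq_getElem (by omega : cc < g'[i].length)]
      rfl
    · rw [List.getElem?_set_ne (fun hh => hcc hh.symm)]
      have := h3 i cc hcc
      rw [hgi, hgi'] at this
      simpa using this.symm
  · rw [if_neg (by omega)]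
    rw [List.getElem?_eq_none (by omega), List.getElem?_eq_none (by omega)]

-- ---------- per-column equality and the outer loop ----------
theorem percol {g : List (List String)} {col : Nat} (hgood : GoodCol g col) :
    (List.range g.length).foldl (stepA g.length col) g =
      writeCol g col (buildCol (colOf g col)) := by
  obtain ⟨hcol, heq⟩ :=
    foldA_props hgood (List.range g.length) g hgood (EqOff_refl g col)
  have hctilt : (List.range g.length).foldl (cstep g.length) (colOf g col) =
      ctilt (colOf g col) := by
    unfold ctilt
    rw [colOf_length]
  rw [← reconstruct hgood heq]
  congr 1
  rw [hcol, hctilt]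
  exact thmCol _

theorem rows_setC {W : Nat} : ∀ (g : List (List String)), (∀ row ∈ g, W ≤ row.length) →
    ∀ (r c : Nat) (v : String), ∀ row ∈ setC g r c v, W ≤ row.length := by
  intro g
  induction g with
  | nil => intro _ r c v row hrow; simp [setC] at hrow
  | cons q rest ih =>
    intro h r c v row hrow
    cases r with
    | zero =>
      simp only [setC, List.mem_cons] at hrow
      rcases hrow with h' | h'
      · subst h'; rw [List.length_set]; exact h q (by simp)
      · exact h row (by simp [h'])
    | succ r' =>
      simp only [setC, List.mem_cons] at hrow
      rcases hrow with h' | h'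
      · subst h'; exact h row (by simp)
      · exact ih (fun q hq => h q (by simp [hq])) r' c v row h'

theorem rows_splice {W : Nat} (col : Nat) : ∀ (vals : List String) (g : List (List String)) (k : Nat),
    (∀ row ∈ g, W ≤ row.length) → ∀ row ∈ spliceCol col g k vals, W ≤ row.length := by
  intro vals
  induction vals with
  | nil => intro g k h; exact h
  | cons v vs ih =>
    intro g k h
    exact ih (setC g k col v) (k + 1) (rows_setC g h k col v)

theorem mem_writeCol_length {g : List (List String)} {W : Nat}
    (h : ∀ row ∈ g, W ≤ row.length) (col : Nat) (vals : List String) :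
    ∀ row ∈ writeCol g col vals, W ≤ row.length := by
  rw [writeCol_eq_splice]
  exact rows_splice col vals g 0 h

theorem outer (N W : Nat) :
    ∀ (cols : List Nat) (g : List (List String)),
      g.length = N → (∀ row ∈ g, W ≤ row.length) → (∀ c ∈ cols, c < W) →
      cols.foldl (fun g col => (List.range N).foldl (stepA N col) g) g =
        cols.foldl (fun g col => writeCol g col (buildCol (colOf g col))) g := by
  intro cols
  induction cols with
  | nil => intro g _ _ _; rfl
  | cons col cols ih =>
    intro g hlen hrows hmem
    simp only [List.foldl_cons]
    have hgood : GoodCol g col :=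
      fun row hrow => lt_of_lt_of_le (hmem col (by simp)) (hrows row hrow)
    have hstep : (List.range N).foldl (stepA N col) g =
        writeCol g col (buildCol (colOf g col)) := by
      rw [← hlen]
      exact percol hgood
    rw [hstep]
    exact ih _ (by rw [length_writeCol]; exact hlen)
      (mem_writeCol_length hrows col _)
      (fun c hc => hmem c (by simp [hc]))

-- ===== VERDICT (by name: the statement is the Claim_ definition above) =====
theorem tilt_up_spec : Claim_equal_tilt_up := by
  intro rocks _hdom hpre
  unfold Spec_tilt_up tilt_up tilt_up_alt
  exact outer rocks.length (rocks.headD []).length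
    (List.range (rocks.headD []).length) rocks rfl hpre.2
    (fun c hc => List.mem_range.mp hc)
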